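-- pv_equiv track=rewrite | github.com/Keerthi3006/CS-556-assignment | switch_simulation_final.py | _all_valid_matchings
-- ===== SOURCE A (Python) =====
-- def _all_valid_matchings(voq_counts):
--     """
--     Generate ALL valid bipartite matchings given a 9-tuple of VOQ counts.
--     A matching is a list of (input, output) pairs where every pair has
--     packets available and no input or output appears more than once.
--     Returns only non-empty matchings.
--     """
--     available = [(i, j) for i in range(3) for j in range(3)
--                  if voq_counts[i * 3 + j] > 0]
--     matchings = [[]]
--     for pair in available:
--         new_matchings = []
--         for m in matchings:
--             new_matchings.append(m)
--             used_in  = {p[0] for p in m}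
--             used_out = {p[1] for p in m}
--             if pair[0] not in used_in and pair[1] not in used_out:
--                 new_matchings.append(m + [pair])
--         matchings = new_matchings
--     return [m for m in matchings if m]   # drop the empty matching
-- ===== SOURCE B (Python) =====
-- def _all_valid_matchings(voq_counts):
--     available = [(i, j) for i in range(3) for j in range(3)
--                  if voq_counts[i * 3 + j] > 0]
--
--     def subsets(pairs):
--         # all subsets of `pairs` in binary-counting order (pairs[0] most significant)
--         if not pairs:
--             return [[]]
--         rest = subsets(pairs[1:])
--         return rest + [[pairs[0]] + s for s in rest]
--
--     def valid(s):
--         ins = [p[0] for p in s]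
--         outs = [p[1] for p in s]
--         return len(set(ins)) == len(ins) and len(set(outs)) == len(outs)
--
--     return [s for s in subsets(available) if s and valid(s)]
-- ===== Notes on version B (the rewrite author's own statement) =====
-- stated objective: simpler
-- what changed: A incrementally grows a list of partial matchings pair by pair, pruning extensions with per-prefix used-input/used-output sets; B recursively enumerates all subsets of the available pairs in the same binary-counting order and keeps the non-empty ones whose inputs and outputs are all distinct via one global filter.
import Mathlib
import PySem

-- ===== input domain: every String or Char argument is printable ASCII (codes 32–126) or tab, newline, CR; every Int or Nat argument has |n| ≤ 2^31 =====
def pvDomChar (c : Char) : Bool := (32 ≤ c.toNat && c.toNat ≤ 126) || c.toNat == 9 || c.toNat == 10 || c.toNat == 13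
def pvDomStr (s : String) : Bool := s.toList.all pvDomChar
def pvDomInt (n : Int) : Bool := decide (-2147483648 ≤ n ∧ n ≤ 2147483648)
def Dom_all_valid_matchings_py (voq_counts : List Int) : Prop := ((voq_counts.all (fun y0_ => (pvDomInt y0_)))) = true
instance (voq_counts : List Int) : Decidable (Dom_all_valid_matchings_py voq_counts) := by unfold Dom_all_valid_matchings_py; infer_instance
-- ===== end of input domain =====

-- B replaces A's incremental build-and-prune of partial matchings by a recursive
-- powerset enumeration followed by one global validity filter (objective: simpler).

-- ===== PORT A =====
-- available = [(i, j) for i in range(3) for j in range(3) if voq_counts[i*3+j] > 0]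
def pvAvailA (voq_counts : List Int) : List (Int × Int) :=
  (PySem.List.pyRange 0 3 1).flatMap (fun i =>
    (PySem.List.pyRange 0 3 1).filterMap (fun j =>
      match PySem.List.pyGet? voq_counts (i * 3 + j) with
      | some v => if v > 0 then some (i, j) else none
      | none => none))   -- none = IndexError, excluded by Pre_

-- body of 'for pair in available' (one pass over matchings)
def pvStepA (matchings : List (List (Int × Int))) (pair : Int × Int) : List (List (Int × Int)) :=
  matchings.foldl (fun new_matchings m =>
    let new_matchings := new_matchings ++ [m]
    let used_in : PySem.Set Int := PySem.Set.ofList (m.map (fun p => p.1))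
    let used_out : PySem.Set Int := PySem.Set.ofList (m.map (fun p => p.2))
    if pair.1 ∉ used_in ∧ pair.2 ∉ used_out then new_matchings ++ [m ++ [pair]]
    else new_matchings) []

def all_valid_matchings_py (voq_counts : List Int) : List (List (Int × Int)) :=
  let available := pvAvailA voq_counts
  let matchings := available.foldl pvStepA [[]]
  matchings.filter (fun m => !m.isEmpty)   -- [m for m in matchings if m]

-- ===== PORT B =====
def pvAvailB (voq_counts : List Int) : List (Int × Int) :=
  (PySem.List.pyRange 0 3 1).flatMap (fun i =>
    (PySem.List.pyRange 0 3 1).filterMap (fun j =>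
      match PySem.List.pyGet? voq_counts (i * 3 + j) with
      | some v => if v > 0 then some (i, j) else none
      | none => none))   -- none = IndexError, excluded by Pre_

-- def subsets(pairs): all subsets in binary-counting order (pairs[0] most significant)
def pvSubsetsB : List (Int × Int) → List (List (Int × Int))
  | [] => [[]]
  | p :: rest =>
    let r := pvSubsetsB rest
    r ++ r.map (fun s => p :: s)

-- def valid(s): inputs all distinct and outputs all distinct
def pvValidB (s : List (Int × Int)) : Bool :=
  let ins := s.map (fun p => p.1)
  let outs := s.map (fun p => p.2)
  ((PySem.Set.ofList ins).length == ins.length) && ((PySem.Set.ofList outs).length == outs.length)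

def all_valid_matchings_py_alt (voq_counts : List Int) : List (List (Int × Int)) :=
  (pvSubsetsB (pvAvailB voq_counts)).filter (fun s => !s.isEmpty && pvValidB s)

-- ===== PRECONDITION & SPEC =====
-- A indexes voq_counts[0..8]; on a list shorter than 9 it raises IndexError (so does B).
def Pre_all_valid_matchings_py (voq_counts : List Int) : Prop := 9 ≤ voq_counts.length
instance (voq_counts : List Int) : Decidable (Pre_all_valid_matchings_py voq_counts) := by unfold Pre_all_valid_matchings_py; infer_instance
def pvWitness_all_valid_matchings_py : List Int := [1, 0, 0, 0, 1, 0, 0, 0, 1]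

def Spec_all_valid_matchings_py (voq_counts : List Int) (out : List (List (Int × Int))) : Prop := out = all_valid_matchings_py_alt voq_counts
instance (voq_counts : List Int) (out : List (List (Int × Int))) : Decidable (Spec_all_valid_matchings_py voq_counts out) := by unfold Spec_all_valid_matchings_py; infer_instance

-- ===== CLAIM (what is proved, stated in full; the proofs are below) =====
def Claim_equal_all_valid_matchings_py : Prop := ∀ (voq_counts : List Int), Dom_all_valid_matchings_py voq_counts → Pre_all_valid_matchings_py voq_counts → Spec_all_valid_matchings_py voq_counts (all_valid_matchings_py voq_counts)

-- ===== LEMMAS AND PROOFS =====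

-- the compatibility relation: two pairs may coexist in a matching
abbrev pvR (a b : Int × Int) : Prop := a.1 ≠ b.1 ∧ a.2 ≠ b.2

theorem pv_avail_eq (v : List Int) : pvAvailB v = pvAvailA v := rfl

theorem pv_ofList_sublist (xs : List Int) : List.Sublist (PySem.Set.ofList xs) xs := by
  induction xs with
  | nil => simp [PySem.Set.ofList_nil]
  | cons x xs ih =>
    rw [PySem.Set.ofList_cons]
    exact List.Sublist.cons₂ x (((PySem.Set.ofList xs).filter_sublist).trans ih)

theorem pv_len_ofList_iff (xs : List Int) : (PySem.Set.ofList xs).length = xs.length ↔ xs.Nodup := by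
  constructor
  · intro h
    have := (pv_ofList_sublist xs).eq_of_length h
    rw [← this]; exact PySem.Set.nodup_ofList xs
  · intro h; rw [PySem.Set.ofList_eq_self_of_nodup xs h]

theorem pv_valid_iff (s : List (Int × Int)) : pvValidB s = true ↔ s.Pairwise pvR := by
  simp only [pvValidB, Bool.and_eq_true, beq_iff_eq, pv_len_ofList_iff, List.Nodup, List.pairwise_map]
  rw [← List.pairwise_and_iff]

theorem pv_valid_eq_decide (s : List (Int × Int)) : pvValidB s = decide (s.Pairwise pvR) := by
  by_cases h : s.Pairwise pvR
  · simp [h, (pv_valid_iff s).mpr h]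
  · simp only [h, decide_false]
    rw [Bool.eq_false_iff]
    intro he; exact h ((pv_valid_iff s).mp he)

-- pvStepA as a flatMap
def pvGA (pair : Int × Int) (m : List (Int × Int)) : List (List (Int × Int)) :=
  if pair.1 ∉ PySem.Set.ofList (m.map (fun p => p.1)) ∧
     pair.2 ∉ PySem.Set.ofList (m.map (fun p => p.2)) then [m, m ++ [pair]] else [m]

theorem pv_stepA_foldl (pair : Int × Int) (M : List (List (Int × Int))) :
    ∀ acc, M.foldl (fun new_matchings m =>
      let new_matchings := new_matchings ++ [m]
      let used_in : PySem.Set Int := PySem.Set.ofList (m.map (fun p => p.1))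
      let used_out : PySem.Set Int := PySem.Set.ofList (m.map (fun p => p.2))
      if pair.1 ∉ used_in ∧ pair.2 ∉ used_out then new_matchings ++ [m ++ [pair]]
      else new_matchings) acc = acc ++ M.flatMap (pvGA pair) := by
  induction M with
  | nil => simp
  | cons m M ih =>
    intro acc
    simp only [List.foldl_cons, List.flatMap_cons]
    rw [ih]
    simp only [pvGA]
    split <;> simp [List.append_assoc]

theorem pv_stepA_eq_flatMap (M : List (List (Int × Int))) (pair : Int × Int) :
    pvStepA M pair = M.flatMap (pvGA pair) := by
  rw [pvStepA, pv_stepA_foldl]; simp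

-- the list of matchings A has built after processing `pairs`, starting from the partial matching m
def pvE (m : List (Int × Int)) (pairs : List (Int × Int)) : List (List (Int × Int)) :=
  pairs.foldl pvStepA [m]

theorem pv_foldl_stepA (pairs : List (Int × Int)) :
    ∀ M, pairs.foldl pvStepA M = M.flatMap (fun m => pvE m pairs) := by
  induction pairs with
  | nil => intro M; simp [pvE]
  | cons p pairs ih =>
    intro M
    simp only [List.foldl_cons]
    rw [ih, pv_stepA_eq_flatMap, List.flatMap_assoc]
    congr 1
    funext m
    show (pvGA p m).flatMap (fun m' => pvE m' pairs) = pvE m (p :: pairs)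
    rw [pvE, List.foldl_cons, ih, pv_stepA_eq_flatMap]
    simp [pvE]

theorem pv_compat_iff (m : List (Int × Int)) (p : Int × Int) :
    (p.1 ∉ PySem.Set.ofList (m.map (fun q => q.1)) ∧
     p.2 ∉ PySem.Set.ofList (m.map (fun q => q.2))) ↔ ∀ q ∈ m, pvR q p := by
  simp only [PySem.Set.mem_ofList, List.mem_map]
  push Not
  constructor
  · rintro ⟨h1, h2⟩ q hq; exact ⟨h1 q hq, h2 q hq⟩
  · intro h; exact ⟨fun q hq => (h q hq).1, fun q hq => (h q hq).2⟩

theorem pvE_cons (m p : _) (pairs : List (Int × Int)) :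
    pvE m (p :: pairs) = (pvGA p m).flatMap (fun m' => pvE m' pairs) := by
  rw [pvE, List.foldl_cons, pv_foldl_stepA, pv_stepA_eq_flatMap]
  simp

-- A's pruning build over `pairs` on top of a valid prefix m = B's subsets filtered for validity with m
theorem pvE_char (pairs : List (Int × Int)) :
    ∀ m, m.Pairwise pvR →
      pvE m pairs =
        ((pvSubsetsB pairs).filter (fun s => decide ((m ++ s).Pairwise pvR))).map (fun s => m ++ s) := by
  induction pairs with
  | nil =>
    intro m hm
    simp [pvE, pvSubsetsB, hm]
  | cons p pairs ih =>
    intro m hm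
    rw [pvE_cons]
    simp only [pvSubsetsB, List.filter_append, List.map_append, List.filter_map, List.map_map]
    by_cases hc : ∀ q ∈ m, pvR q p
    · have hm' : (m ++ [p]).Pairwise pvR := by
        rw [List.pairwise_append]
        exact ⟨hm, List.pairwise_singleton _ _, by simpa using hc⟩
      rw [pvGA, if_pos ((pv_compat_iff m p).mpr hc)]
      have h2 : ((pvSubsetsB pairs).filter
            ((fun s => decide ((m ++ s).Pairwise pvR)) ∘ fun s => p :: s)).map
            ((fun s => m ++ s) ∘ fun s => p :: s)
          = ((pvSubsetsB pairs).filter (fun s => decide (((m ++ [p]) ++ s).Pairwise pvR))).map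
            (fun s => (m ++ [p]) ++ s) := by
        simp [Function.comp_def]
      rw [h2, ← ih m hm, ← ih (m ++ [p]) hm']
      simp [pvE]
    · rw [pvGA, if_neg (fun hcontra => hc ((pv_compat_iff m p).mp hcontra))]
      have h2 : ((pvSubsetsB pairs).filter
            ((fun s => decide ((m ++ s).Pairwise pvR)) ∘ fun s => p :: s)) = [] := by
        apply List.filter_eq_nil_iff.mpr
        intro s _
        simp only [Function.comp_def, decide_eq_true_eq]
        intro hpw
        exact hc fun q hq => (List.pairwise_append.mp hpw).2.2 q hq p (by simp)
      rw [h2, ← ih m hm]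
      simp [pvE]

-- ===== VERDICT (by name: the statement is the Claim_ definition above) =====
theorem all_valid_matchings_py_spec : Claim_equal_all_valid_matchings_py := by
  intro v _ _
  unfold Spec_all_valid_matchings_py
  simp only [all_valid_matchings_py, all_valid_matchings_py_alt, pv_avail_eq]
  rw [pv_foldl_stepA]
  simp only [List.flatMap_cons, List.flatMap_nil, List.append_nil]
  rw [pvE_char _ [] List.Pairwise.nil]
  simp only [List.nil_append, List.map_id']
  rw [List.filter_filter]
  apply List.filter_congr
  intro s _
  rw [pv_valid_eq_decide]
  rfl
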